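-- pv_equiv track=rewrite | github.com/Matt740/School | Python Projects ESC180/Project2_Gomoku_Bot.py | detect_row_is_win
-- ===== SOURCE A (Python) =====
-- def is_bounded_start(board, y_end, x_end, length, d_y, d_x): # Helper function for is_bounded
--     '''returns True if the sequence of length length that ends at location (y_end, x_end) is bounded at the end opposite of (y_end, x_end)'''
--     if y_end - length*d_y > 7 or y_end - length*d_y < 0:
--         return True
--     elif x_end - length*d_x > 7 or x_end - length*d_x < 0:
--         return True
--     elif board[y_end - length*d_y][x_end - length*d_x] != ' ':
--         return True
--     return False
--
-- def is_bounded_end(board, y_end, x_end, length, d_y, d_x): # Helper function for is_bounded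
--     '''returns True if the sequence of length length that ends at location (y_end, x_end) is bounded at the end (y_end, x_end)'''
--     if y_end + d_y > 7 or y_end + d_y < 0:
--         return True
--     elif x_end + d_x > 7 or x_end + d_x < 0:
--         return True
--     elif board[y_end + d_y][x_end + d_x] != ' ':
--         return True
--     return False
--
-- def is_bounded(board, y_end, x_end, length, d_y, d_x):
--     '''analyses the sequence of length length that ends at location (y_end, x_end). The function returns "OPEN" if the sequence is open, "SEMIOPEN" if the sequence if semi-open, and "CLOSED" if the sequence is closed.'''
--     if is_bounded_start(board, y_end, x_end, length, d_y, d_x) == True and is_bounded_end(board, y_end, x_end, length, d_y, d_x) == True: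
--         return "CLOSED"
--     elif is_bounded_start(board, y_end, x_end, length, d_y, d_x) == True and is_bounded_end(board, y_end, x_end, length, d_y, d_x) == False:
--         return "SEMIOPEN"
--     elif is_bounded_start(board, y_end, x_end, length, d_y, d_x) == False and is_bounded_end(board, y_end, x_end, length, d_y, d_x) == True:
--         return "SEMIOPEN"
--     elif is_bounded_start(board, y_end, x_end, length, d_y, d_x) == False and is_bounded_end(board, y_end, x_end, length, d_y, d_x) == False:
--         return "OPEN"
--
-- def detect_row_is_win(board, col, y_start, x_start, length, d_y, d_x):
--     open_seq_count = 0
--     semi_open_seq_count = 0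
--     closed_seq_count = 0
--     counter = 0
--     while 0 <= y_start + (length-1)*d_y <= 7 and 0 <= x_start + (length-1)*d_x <= 7:
--         for i in range(length):
--             if board[y_start + i*d_y][x_start + i*d_x] == col:
--                 counter += 1
--         if counter == length:
--             if is_bounded(board, y_start, x_start, length, -d_y, -d_x) == "SEMIOPEN":
--                 semi_open_seq_count += 1
--             elif is_bounded(board, y_start, x_start, length, -d_y, -d_x) == "OPEN":
--                 open_seq_count += 1
--             elif is_bounded(board, y_start, x_start, length, -d_y, -d_x) == "CLOSED":
--                 closed_seq_count += 1
--         y_start += d_y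
--         x_start += d_x
--         counter = 0
--     return open_seq_count, semi_open_seq_count, closed_seq_count
-- ===== SOURCE B (Python) =====
-- def detect_row_is_win(board, col, y_start, x_start, length, d_y, d_x):
--     # Sliding-window re-implementation: a running match count instead of
--     # re-counting the window at every position; a full window is classified by how
--     # many of its two boundary cells are blocked (0 -> open, 1 -> semi-open,
--     # 2 -> closed).
--     def blocked(y, x):
--         return (not (0 <= y <= 7 and 0 <= x <= 7)) or board[y][x] != ' '
--     if not (0 <= y_start + (length - 1) * d_y <= 7 and 0 <= x_start + (length - 1) * d_x <= 7):
--         return 0, 0, 0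
--     counts = [0, 0, 0]  # open, semi-open, closed
--     run = sum(board[y_start + i * d_y][x_start + i * d_x] == col for i in range(length))
--     while True:
--         if run == length:
--             counts[blocked(y_start - d_y, x_start - d_x)
--                    + blocked(y_start + length * d_y, x_start + length * d_x)] += 1
--         ny, nx = y_start + d_y, x_start + d_x
--         if not (0 <= ny + (length - 1) * d_y <= 7 and 0 <= nx + (length - 1) * d_x <= 7):
--             break
--         if length > 0:
--             run += (board[ny + (length - 1) * d_y][nx + (length - 1) * d_x] == col) \
--                    - (board[y_start][x_start] == col)
--         y_start, x_start = ny, nx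
--     return counts[0], counts[1], counts[2]
-- ===== Notes on version B (the rewrite author's own statement) =====
-- stated objective: alternative
-- what changed: B replaces A's per-window inner re-count loop by a sliding running count updated once per window, and replaces the four-way is_bounded string classification by counting the two blocked boundary cells (0=open, 1=semi-open, 2=closed).
import Mathlib
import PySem

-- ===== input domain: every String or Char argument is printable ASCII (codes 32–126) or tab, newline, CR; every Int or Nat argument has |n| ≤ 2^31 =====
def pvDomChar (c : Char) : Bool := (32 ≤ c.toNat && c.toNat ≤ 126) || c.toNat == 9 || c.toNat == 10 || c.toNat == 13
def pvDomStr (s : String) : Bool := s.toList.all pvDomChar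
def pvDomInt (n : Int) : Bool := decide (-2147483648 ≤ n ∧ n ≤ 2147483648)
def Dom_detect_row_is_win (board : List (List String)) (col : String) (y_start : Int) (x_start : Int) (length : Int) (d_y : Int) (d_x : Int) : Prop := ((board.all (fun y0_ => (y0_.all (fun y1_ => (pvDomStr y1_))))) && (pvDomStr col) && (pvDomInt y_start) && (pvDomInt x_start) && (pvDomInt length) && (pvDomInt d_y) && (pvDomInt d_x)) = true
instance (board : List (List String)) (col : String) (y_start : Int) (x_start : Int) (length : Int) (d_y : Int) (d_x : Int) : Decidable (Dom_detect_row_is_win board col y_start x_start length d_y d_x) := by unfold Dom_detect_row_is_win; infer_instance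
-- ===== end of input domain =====

-- B replaces A's per-window re-count by a sliding running count and classifies a
-- full window by how many of its two boundary cells are blocked (objective:
-- alternative — a different single-pass structure without the inner re-count loop).

-- board[y][x] as a total function: Python indexing (pyGet?, negative wrap); the
-- defaults are only reached where Python raises IndexError, which Pre_ excludes.
def pvCell (board : List (List String)) (y x : Int) : String :=
  (PySem.List.pyGet? ((PySem.List.pyGet? board y).getD []) x).getD "?"

-- ===== PORT A =====
def pvIsBoundedStart (board : List (List String)) (y_end x_end length d_y d_x : Int) : Bool :=
  if y_end - length * d_y > 7 ∨ y_end - length * d_y < 0 then true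
  else if x_end - length * d_x > 7 ∨ x_end - length * d_x < 0 then true
  else if pvCell board (y_end - length * d_y) (x_end - length * d_x) ≠ " " then true
  else false

def pvIsBoundedEnd (board : List (List String)) (y_end x_end length d_y d_x : Int) : Bool :=
  if y_end + d_y > 7 ∨ y_end + d_y < 0 then true
  else if x_end + d_x > 7 ∨ x_end + d_x < 0 then true
  else if pvCell board (y_end + d_y) (x_end + d_x) ≠ " " then true
  else false

def pvIsBounded (board : List (List String)) (y_end x_end length d_y d_x : Int) : String :=
  if pvIsBoundedStart board y_end x_end length d_y d_x = true ∧ pvIsBoundedEnd board y_end x_end length d_y d_x = true then "CLOSED"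
  else if pvIsBoundedStart board y_end x_end length d_y d_x = true ∧ pvIsBoundedEnd board y_end x_end length d_y d_x = false then "SEMIOPEN"
  else if pvIsBoundedStart board y_end x_end length d_y d_x = false ∧ pvIsBoundedEnd board y_end x_end length d_y d_x = true then "SEMIOPEN"
  else if pvIsBoundedStart board y_end x_end length d_y d_x = false ∧ pvIsBoundedEnd board y_end x_end length d_y d_x = false then "OPEN"
  else ""  -- unreachable: the four branches are exhaustive (Python would return None)

-- A's while-loop; fuel makes it total.  Within Pre_ the Python loop runs at most 8
-- iterations (the window endpoint moves by a nonzero step while staying in 0..7),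
-- so fuel 100 is never exhausted there.
def pvAloop (board : List (List String)) (col : String) (length d_y d_x : Int) :
    Nat → Int → Int → Int → Int → Int → Int × Int × Int
  | 0, _, _, o, s, c => (o, s, c)
  | fuel + 1, y, x, o, s, c =>
    if 0 ≤ y + (length - 1) * d_y ∧ y + (length - 1) * d_y ≤ 7 ∧
       0 ≤ x + (length - 1) * d_x ∧ x + (length - 1) * d_x ≤ 7 then
      let counter : Int := (PySem.List.pyRange 0 length 1).foldl
        (fun acc i => if pvCell board (y + i * d_y) (x + i * d_x) = col then acc + 1 else acc) 0
      let st :=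
        if counter = length then
          if pvIsBounded board y x length (-d_y) (-d_x) = "SEMIOPEN" then (o, s + 1, c)
          else if pvIsBounded board y x length (-d_y) (-d_x) = "OPEN" then (o + 1, s, c)
          else if pvIsBounded board y x length (-d_y) (-d_x) = "CLOSED" then (o, s, c + 1)
          else (o, s, c)
        else (o, s, c)
      pvAloop board col length d_y d_x fuel (y + d_y) (x + d_x) st.1 st.2.1 st.2.2
    else (o, s, c)

def detect_row_is_win (board : List (List String)) (col : String) (y_start : Int) (x_start : Int) (length : Int) (d_y : Int) (d_x : Int) : Int × Int × Int :=
  pvAloop board col length d_y d_x 100 y_start x_start 0 0 0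

-- ===== PORT B =====
def pvB01 (b : Bool) : Int := if b then 1 else 0  -- Python bool used in arithmetic

def pvBlocked (board : List (List String)) (y x : Int) : Bool :=
  if ¬ (0 ≤ y ∧ y ≤ 7 ∧ 0 ≤ x ∧ x ≤ 7) then true else decide (pvCell board y x ≠ " ")

-- the initial running count: sum(board[y+i*d_y][x+i*d_x] == col for i in range(length))
def pvRun (board : List (List String)) (col : String) (y x length d_y d_x : Int) : Int :=
  (PySem.List.pyRange 0 length 1).foldl
    (fun acc i => acc + pvB01 (pvCell board (y + i * d_y) (x + i * d_x) = col)) 0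

-- B's sliding loop (same fuel remark as for pvAloop)
def pvBloop (board : List (List String)) (col : String) (length d_y d_x : Int) :
    Nat → Int → Int → Int → Int → Int → Int → Int × Int × Int
  | fuel, y, x, run, o, s, c =>
    let st :=
      if run = length then
        let nb := pvB01 (pvBlocked board (y - d_y) (x - d_x)) +
                  pvB01 (pvBlocked board (y + length * d_y) (x + length * d_x))
        if nb = 0 then (o + 1, s, c) else if nb = 1 then (o, s + 1, c) else (o, s, c + 1)
      else (o, s, c)
    if 0 ≤ (y + d_y) + (length - 1) * d_y ∧ (y + d_y) + (length - 1) * d_y ≤ 7 ∧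
       0 ≤ (x + d_x) + (length - 1) * d_x ∧ (x + d_x) + (length - 1) * d_x ≤ 7 then
      match fuel with
      | 0 => st
      | fuel + 1 =>
        let run' := if 0 < length then
            run + pvB01 (pvCell board ((y + d_y) + (length - 1) * d_y) ((x + d_x) + (length - 1) * d_x) = col)
                - pvB01 (pvCell board y x = col)
          else run
        pvBloop board col length d_y d_x fuel (y + d_y) (x + d_x) run' st.1 st.2.1 st.2.2
    else st

def detect_row_is_win_alt (board : List (List String)) (col : String) (y_start : Int) (x_start : Int) (length : Int) (d_y : Int) (d_x : Int) : Int × Int × Int :=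
  if 0 ≤ y_start + (length - 1) * d_y ∧ y_start + (length - 1) * d_y ≤ 7 ∧
     0 ≤ x_start + (length - 1) * d_x ∧ x_start + (length - 1) * d_x ≤ 7 then
    pvBloop board col length d_y d_x 99 y_start x_start
      (pvRun board col y_start x_start length d_y d_x) 0 0 0
  else (0, 0, 0)

-- ===== PRECONDITION & SPEC =====
-- Pre_ excludes inputs where Python A raises IndexError (boards too small or too
-- ragged for the cells the scan touches) or loops forever (step (0,0) with the
-- initial window in range); when the initial window test fails A touches nothing
-- and every input is admitted, and a negative length never touches the board.
-- On the remaining excluded corners, ragged boards whose accesses happen to stay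
-- in range (possibly by negative-index wraparound), A does return, and B returns
-- the same value, but an exact closed-form condition for them would have to
-- re-simulate the scan.
def Pre_detect_row_is_win (board : List (List String)) (col : String) (y_start : Int) (x_start : Int) (length : Int) (d_y : Int) (d_x : Int) : Prop :=
  ¬ (0 ≤ y_start + (length - 1) * d_y ∧ y_start + (length - 1) * d_y ≤ 7 ∧
     0 ≤ x_start + (length - 1) * d_x ∧ x_start + (length - 1) * d_x ≤ 7) ∨
  (length < 0 ∧ (d_y ≠ 0 ∨ d_x ≠ 0)) ∨
  (8 ≤ board.length ∧ (∀ r ∈ board, 8 ≤ r.length) ∧ (d_y ≠ 0 ∨ d_x ≠ 0) ∧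
   -8 ≤ y_start ∧ y_start ≤ 7 ∧ -8 ≤ x_start ∧ x_start ≤ 7)
instance (board : List (List String)) (col : String) (y_start : Int) (x_start : Int) (length : Int) (d_y : Int) (d_x : Int) : Decidable (Pre_detect_row_is_win board col y_start x_start length d_y d_x) := by unfold Pre_detect_row_is_win; infer_instance

def pvWitness_detect_row_is_win : List (List String) × String × Int × Int × Int × Int × Int :=
  ([[" ", " ", " ", " ", " ", " ", " ", " "],
    ["b", "b", "b", " ", " ", " ", " ", " "],
    [" ", " ", " ", " ", " ", " ", " ", " "],
    [" ", " ", " ", " ", " ", " ", " ", " "],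
    [" ", " ", " ", " ", " ", " ", " ", " "],
    [" ", " ", " ", " ", " ", " ", " ", " "],
    [" ", " ", " ", " ", " ", " ", " ", " "],
    [" ", " ", " ", " ", " ", " ", " ", " "]], "b", 1, 0, 3, 0, 1)

def Spec_detect_row_is_win (board : List (List String)) (col : String) (y_start : Int) (x_start : Int) (length : Int) (d_y : Int) (d_x : Int) (out : Int × Int × Int) : Prop := out = detect_row_is_win_alt board col y_start x_start length d_y d_x
instance (board : List (List String)) (col : String) (y_start : Int) (x_start : Int) (length : Int) (d_y : Int) (d_x : Int) (out : Int × Int × Int) : Decidable (Spec_detect_row_is_win board col y_start x_start length d_y d_x out) := by unfold Spec_detect_row_is_win; infer_instance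

-- ===== CLAIM (what is proved, stated in full; the proofs are below) =====
def Claim_equal_detect_row_is_win : Prop := ∀ (board : List (List String)) (col : String) (y_start : Int) (x_start : Int) (length : Int) (d_y : Int) (d_x : Int), Dom_detect_row_is_win board col y_start x_start length d_y d_x → Pre_detect_row_is_win board col y_start x_start length d_y d_x → Spec_detect_row_is_win board col y_start x_start length d_y d_x (detect_row_is_win board col y_start x_start length d_y d_x)

-- ===== LEMMAS AND PROOFS =====

-- A's if-shaped counter fold equals B's running-count expression pvRun
theorem pvCounter_eq_pvRun (board : List (List String)) (col : String) (y x length d_y d_x : Int) :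
    (PySem.List.pyRange 0 length 1).foldl
      (fun acc i => if pvCell board (y + i * d_y) (x + i * d_x) = col then acc + 1 else acc) 0
    = pvRun board col y x length d_y d_x := by
  unfold pvRun
  rw [PySem.List.foldl_ite_add_one, PySem.List.foldl_add]
  simp only [pvB01]
  rw [PySem.List.sum_map_ite_one_zero]

-- pvRun as a sum over List.range
theorem pvRun_eq_sum (board : List (List String)) (col : String) (y x length d_y d_x : Int) :
    pvRun board col y x length d_y d_x
    = ((List.range length.toNat).map
        (fun (k : Nat) => pvB01 (pvCell board (y + (k : Int) * d_y) (x + (k : Int) * d_x) = col))).sum := by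
  unfold pvRun
  rw [PySem.List.foldl_add, PySem.List.pyRange_one, List.map_map]
  simp only [zero_add, sub_zero]
  apply congrArg List.sum
  apply List.map_congr_left
  intro k _
  simp [Function.comp]

theorem pvSum_range_shift (g : Nat → Int) : ∀ (n : Nat),
    ((List.range n).map (fun k => g (k + 1))).sum = ((List.range n).map g).sum + g n - g 0 := by
  intro n
  induction n with
  | zero => simp
  | succ n ih => rw [List.range_succ]; simp [ih]; ring

theorem pvRun_shift (board : List (List String)) (col : String) (y x length d_y d_x : Int)
    (h : 0 < length) :
    pvRun board col (y + d_y) (x + d_x) length d_y d_x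
    = pvRun board col y x length d_y d_x
      + pvB01 (pvCell board (y + length * d_y) (x + length * d_x) = col)
      - pvB01 (pvCell board y x = col) := by
  rw [pvRun_eq_sum, pvRun_eq_sum]
  have hshift : ((List.range length.toNat).map
      (fun (k : Nat) => pvB01 (pvCell board ((y + d_y) + (k : Int) * d_y) ((x + d_x) + (k : Int) * d_x) = col))).sum
      = ((List.range length.toNat).map (fun (k : Nat) =>
          (fun (j : Nat) => pvB01 (pvCell board (y + (j : Int) * d_y) (x + (j : Int) * d_x) = col)) (k + 1))).sum := by
    apply congrArg List.sum
    apply List.map_congr_left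
    intro k _
    have e1 : (y + d_y) + (k : Int) * d_y = y + ((k : Int) + 1) * d_y := by ring
    have e2 : (x + d_x) + (k : Int) * d_x = x + ((k : Int) + 1) * d_x := by ring
    rw [e1, e2]
    push_cast
    ring_nf
  rw [hshift]
  have hs := pvSum_range_shift (fun (j : Nat) => pvB01 (pvCell board (y + (j : Int) * d_y) (x + (j : Int) * d_x) = col)) length.toNat
  simp only at hs ⊢
  rw [hs]
  have hL : ((length.toNat : Int)) = length := by omega
  rw [hL]
  simp only [Nat.cast_zero, zero_mul, add_zero]

-- pvRun is 0 for non-positive length (empty window)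
theorem pvRun_nonpos (board : List (List String)) (col : String) (y x length d_y d_x : Int)
    (h : length ≤ 0) : pvRun board col y x length d_y d_x = 0 := by
  rw [pvRun_eq_sum]
  have : length.toNat = 0 := by omega
  simp [this]

-- A's is_bounded_start/_end at the call site, in terms of B's blocked test
theorem pvStart_eq (board : List (List String)) (y x length d_y d_x : Int) :
    pvIsBoundedStart board y x length (-d_y) (-d_x)
    = pvBlocked board (y + length * d_y) (x + length * d_x) := by
  unfold pvIsBoundedStart pvBlocked
  have e1 : y - length * -d_y = y + length * d_y := by ring
  have e2 : x - length * -d_x = x + length * d_x := by ring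
  rw [e1, e2]
  split_ifs <;> first | rfl | omega | simp_all
theorem pvEnd_eq (board : List (List String)) (y x length d_y d_x : Int) :
    pvIsBoundedEnd board y x length (-d_y) (-d_x)
    = pvBlocked board (y - d_y) (x - d_x) := by
  unfold pvIsBoundedEnd pvBlocked
  have e1 : y + -d_y = y - d_y := by ring
  have e2 : x + -d_x = x - d_x := by ring
  rw [e1, e2]
  split_ifs <;> first | rfl | omega | simp_all

-- the two update steps agree
theorem pvStep_eq (board : List (List String)) (length d_y d_x : Int) (y x o s c : Int) :
    (if pvIsBounded board y x length (-d_y) (-d_x) = "SEMIOPEN" then (o, s + 1, c)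
     else if pvIsBounded board y x length (-d_y) (-d_x) = "OPEN" then (o + 1, s, c)
     else if pvIsBounded board y x length (-d_y) (-d_x) = "CLOSED" then (o, s, c + 1)
     else (o, s, c))
    = (let nb := pvB01 (pvBlocked board (y - d_y) (x - d_x)) +
                 pvB01 (pvBlocked board (y + length * d_y) (x + length * d_x));
       if nb = 0 then (o + 1, s, c) else if nb = 1 then (o, s + 1, c) else (o, s, c + 1)) := by
  unfold pvIsBounded
  rw [pvStart_eq, pvEnd_eq]
  cases hb : pvBlocked board (y - d_y) (x - d_x) <;>
    cases ha : pvBlocked board (y + length * d_y) (x + length * d_x) <;>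
      simp [pvB01]

-- lockstep: A's loop with one unit of fuel in hand equals B's loop carrying the running count
theorem pvLoop_eq (board : List (List String)) (col : String) (length d_y d_x : Int) :
    ∀ (F : Nat) (y x o s c : Int),
      (0 ≤ y + (length - 1) * d_y ∧ y + (length - 1) * d_y ≤ 7 ∧
       0 ≤ x + (length - 1) * d_x ∧ x + (length - 1) * d_x ≤ 7) →
      pvAloop board col length d_y d_x (F + 1) y x o s c
      = pvBloop board col length d_y d_x F y x (pvRun board col y x length d_y d_x) o s c := by
  intro F
  induction F with
  | zero =>
    intro y x o s c hc
    rw [pvAloop, pvBloop]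
    rw [if_pos hc, pvCounter_eq_pvRun, pvStep_eq]
    rw [pvAloop]
    by_cases hn : (0 ≤ (y + d_y) + (length - 1) * d_y ∧ (y + d_y) + (length - 1) * d_y ≤ 7 ∧
                   0 ≤ (x + d_x) + (length - 1) * d_x ∧ (x + d_x) + (length - 1) * d_x ≤ 7)
    · rw [if_pos hn]
    · rw [if_neg hn]
  | succ F ih =>
    intro y x o s c hc
    rw [pvAloop, pvBloop]
    rw [if_pos hc, pvCounter_eq_pvRun, pvStep_eq]
    by_cases hn : (0 ≤ (y + d_y) + (length - 1) * d_y ∧ (y + d_y) + (length - 1) * d_y ≤ 7 ∧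
                   0 ≤ (x + d_x) + (length - 1) * d_x ∧ (x + d_x) + (length - 1) * d_x ≤ 7)
    · rw [if_pos hn]
      rw [ih (y + d_y) (x + d_x) _ _ _ hn]
      by_cases hL : 0 < length
      · rw [if_pos hL]
        have e1 : (y + d_y) + (length - 1) * d_y = y + length * d_y := by ring
        have e2 : (x + d_x) + (length - 1) * d_x = x + length * d_x := by ring
        rw [e1, e2, pvRun_shift board col y x length d_y d_x hL]
      · rw [if_neg hL, pvRun_nonpos board col (y + d_y) (x + d_x) length d_y d_x (by omega),
            pvRun_nonpos board col y x length d_y d_x (by omega)]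
    · rw [if_neg hn]
      rw [pvAloop, if_neg hn]

-- ===== VERDICT (by name: the statement is the Claim_ definition above) =====
theorem detect_row_is_win_spec : Claim_equal_detect_row_is_win := by
  intro board col y x length d_y d_x _ _
  unfold Spec_detect_row_is_win detect_row_is_win detect_row_is_win_alt
  by_cases hc : (0 ≤ y + (length - 1) * d_y ∧ y + (length - 1) * d_y ≤ 7 ∧
                 0 ≤ x + (length - 1) * d_x ∧ x + (length - 1) * d_x ≤ 7)
  · rw [if_pos hc]
    exact pvLoop_eq board col length d_y d_x 99 y x 0 0 0 hc
  · rw [if_neg hc, pvAloop, if_neg hc]
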